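-- pv_equiv track=rewrite | github.com/kimth007kim/python_algorithm | this_is_coding_test/Part13 DFSBFS/13-18 괄호변환.py | correct
-- ===== SOURCE A (Python) =====
-- def correct(p):
--     dd = ""
--     plen = len(p)
--     point = 0
--     cnt = 0
--     array = []
--     for i in range(plen):
--         if p[i] == "(":
--             point += 1
--         if p[i] == ")":
--             point -= 1
--         if point == -1 or cnt == plen:
--             break
--         cnt += 1
--     return cnt
-- ===== SOURCE B (Python) =====
-- def _positions(p, ch):
--     return [i for i, c in enumerate(p) if c == ch]
--
--
-- def correct(p):
--     # Two-pointer rank matching: the answer is the first ')' whose rank k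
--     # (0-based among all ')') is at least the number of '(' before it.
--     opens = _positions(p, "(")
--     closes = _positions(p, ")")
--     j = 0
--     for k, pos in enumerate(closes):
--         while j < len(opens) and opens[j] < pos:
--             j += 1
--         if j <= k:
--             return pos
--     return len(p)
-- ===== Notes on version B (the rewrite author's own statement) =====
-- stated objective: alternative
-- what changed: B keeps no running balance: it materializes the index lists of '(' and ')' positions and finds, by a two-pointer merge over those two sorted lists, the first ')' whose 0-based rank is at least the number of '(' occurring before it; that position (or len(p)) is the answer.
import Mathlib
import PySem

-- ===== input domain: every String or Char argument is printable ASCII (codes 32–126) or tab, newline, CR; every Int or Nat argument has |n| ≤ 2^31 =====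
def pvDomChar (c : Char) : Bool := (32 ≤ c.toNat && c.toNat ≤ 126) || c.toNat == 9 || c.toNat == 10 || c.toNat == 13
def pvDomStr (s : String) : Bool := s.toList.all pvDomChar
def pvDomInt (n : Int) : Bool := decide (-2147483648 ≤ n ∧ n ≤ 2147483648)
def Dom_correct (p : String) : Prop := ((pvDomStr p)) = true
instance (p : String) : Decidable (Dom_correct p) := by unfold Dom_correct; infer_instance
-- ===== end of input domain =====

-- B drops A's running-balance loop: it builds the index lists of '(' and ')' and
-- two-pointer-merges them, returning the first ')' whose rank covers the '(' before it.

-- ===== PORT A =====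
-- A's for-loop over the characters, carrying point (balance) and cnt, with A's
-- 'point == -1 or cnt == plen' break condition kept verbatim (plen passed along).
def correctLoop (plen : Int) : List Char → Int → Int → Int
  | [], _, cnt => cnt
  | c :: rest, point, cnt =>
    let point := if c = '(' then point + 1 else point
    let point := if c = ')' then point - 1 else point
    if point = -1 ∨ cnt = plen then cnt else correctLoop plen rest point (cnt + 1)

def correct (p : String) : Int := correctLoop (p.toList.length : Int) p.toList 0 0

-- ===== PORT B =====
-- [i for i, c in enumerate(p) if c == ch]
def positions (cs : List Char) (ch : Char) : List Int :=
  (PySem.List.enumerate cs).filterMap (fun ic => if ic.2 = ch then some ic.1 else none)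

-- the inner 'while j < len(opens) and opens[j] < pos: j += 1' (carries the suffix not yet skipped)
def skipLt : List Int → Int → Nat → List Int × Nat
  | [], _, j => ([], j)
  | o :: os, pos, j => if o < pos then skipLt os pos (j + 1) else (o :: os, j)

-- the 'for k, pos in enumerate(closes)' loop
def bLoop : List Int → Nat → Nat → List Int → Option Int
  | _, _, _, [] => none
  | opens, j, k, pos :: rest =>
    match skipLt opens pos j with
    | (opens', j') => if j' ≤ k then some pos else bLoop opens' j' (k + 1) rest

def correct_alt (p : String) : Int :=
  match bLoop (positions p.toList '(') 0 0 (positions p.toList ')') with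
  | some pos => pos
  | none => (p.toList.length : Int)

-- ===== PRECONDITION & SPEC =====
def Spec_correct (p : String) (out : Int) : Prop := out = correct_alt p
instance (p : String) (out : Int) : Decidable (Spec_correct p out) := by unfold Spec_correct; infer_instance

-- ===== CLAIM (what is proved, stated in full; the proofs are below) =====
def Claim_equal_correct : Prop := ∀ (p : String), Dom_correct p → Spec_correct p (correct p)

-- ===== LEMMAS AND PROOFS =====

-- first index at which the running balance, started at depth d, goes below 0
def fneg : Nat → List Char → Option Nat
  | _, [] => none
  | d, c :: rest =>
    if c = '(' then (fneg (d + 1) rest).map (· + 1)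
    else if c = ')' then
      match d with
      | 0 => some 0
      | d' + 1 => (fneg d' rest).map (· + 1)
    else (fneg d rest).map (· + 1)

-- number of elements of xs below p
def cntLt (xs : List Int) (p : Int) : Nat := (xs.filter (fun x => decide (x < p))).length

-- generalized positions with explicit start offset
def positionsFrom (s : Int) (cs : List Char) (ch : Char) : List Int :=
  (PySem.List.enumerate cs s).filterMap (fun ic => if ic.2 = ch then some ic.1 else none)

theorem positionsFrom_cons (s : Int) (c : Char) (cs : List Char) (ch : Char) :
    positionsFrom s (c :: cs) ch =
      (if c = ch then [s] else []) ++ positionsFrom (s + 1) cs ch := by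
  simp only [positionsFrom, PySem.List.enumerate_cons, List.filterMap_cons]
  by_cases h : c = ch <;> simp [h]

theorem mem_positionsFrom_ge {s : Int} {cs : List Char} {ch : Char} {x : Int}
    (hx : x ∈ positionsFrom s cs ch) : s ≤ x := by
  induction cs generalizing s with
  | nil => simp [positionsFrom, PySem.List.enumerate] at hx
  | cons c rest ih =>
    rw [positionsFrom_cons] at hx
    rcases List.mem_append.1 hx with h | h
    · by_cases hc : c = ch <;> simp [hc] at h; omega
    · have := ih h; omega

theorem pairwise_lt_positionsFrom (s : Int) (cs : List Char) (ch : Char) :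
    (positionsFrom s cs ch).Pairwise (· < ·) := by
  induction cs generalizing s with
  | nil => simp [positionsFrom, PySem.List.enumerate]
  | cons c rest ih =>
    rw [positionsFrom_cons]
    by_cases hc : c = ch
    · simp only [hc]
      refine List.pairwise_append.2 ⟨List.pairwise_singleton _ _, ih (s + 1), ?_⟩
      intro x hx y hy
      simp at hx; subst hx
      have := mem_positionsFrom_ge hy; omega
    · simpa [hc] using ih (s + 1)

theorem cntLt_eq_zero {xs : List Int} {p : Int} (h : ∀ x ∈ xs, p ≤ x) : cntLt xs p = 0 := by
  unfold cntLt
  rw [List.filter_eq_nil_iff.2 (by intro x hx; simpa using not_lt.2 (h x hx))]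
  rfl

theorem cntLt_cons (x : Int) (xs : List Int) (p : Int) :
    cntLt (x :: xs) p = (if x < p then 1 else 0) + cntLt xs p := by
  unfold cntLt; by_cases h : x < p <;> simp [h] <;> omega

theorem cntLt_append (a b : List Int) (p : Int) :
    cntLt (a ++ b) p = cntLt a p + cntLt b p := by
  unfold cntLt; simp

theorem skipLt_eq (os : List Int) (pos : Int) (j : Nat) :
    skipLt os pos j =
      (os.dropWhile (fun o => decide (o < pos)),
       j + (os.takeWhile (fun o => decide (o < pos))).length) := by
  induction os generalizing j with
  | nil => simp [skipLt, List.dropWhile, List.takeWhile]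
  | cons o os ih =>
    by_cases h : o < pos
    · simp [skipLt, h, ih]; omega
    · simp [skipLt, h]

theorem takeWhile_length_eq_cntLt {os : List Int} (hos : os.Pairwise (· ≤ ·)) (pos : Int) :
    (os.takeWhile (fun o => decide (o < pos))).length = cntLt os pos := by
  induction os with
  | nil => rfl
  | cons o os ih =>
    rcases List.pairwise_cons.1 hos with ⟨hle, hos'⟩
    by_cases h : o < pos
    · simp [h, cntLt_cons, ih hos']; omega
    · simp [h, cntLt_cons]
      exact (cntLt_eq_zero (fun x hx => le_trans (not_lt.1 h) (hle x hx))).symm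

theorem cntLt_decomp {os : List Int} {pos pos' : Int} (hpp : pos ≤ pos') :
    cntLt os pos' =
      (os.takeWhile (fun o => decide (o < pos))).length +
        cntLt (os.dropWhile (fun o => decide (o < pos))) pos' := by
  conv_lhs => rw [← List.takeWhile_append_dropWhile (p := fun o => decide (o < pos)) (l := os)]
  rw [cntLt_append]
  congr 1
  unfold cntLt
  rw [List.filter_eq_self.2]
  intro x hx
  have := List.mem_takeWhile_imp hx
  simp at this ⊢
  omega

theorem find?_congr_mem {α : Type} (l : List α) (p q : α → Bool)
    (h : ∀ x ∈ l, p x = q x) : l.find? p = l.find? q := by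
  induction l with
  | nil => rfl
  | cons x xs ih =>
    simp only [List.find?]
    rw [h x (by simp)]
    cases q x
    · exact ih (fun y hy => h y (by simp [hy]))
    · rfl

-- the B loop finds the first close whose '(' count does not exceed its ')' count
theorem bLoop_eq (OS CLS : List Int) (cls : List Int) :
    ∀ (os : List Int) (j k : Nat),
      os.Pairwise (· ≤ ·) → cls.Pairwise (· < ·) →
      (∀ pos ∈ cls, j + cntLt os pos = cntLt OS pos) →
      (∀ pos ∈ cls, k + cntLt cls pos = cntLt CLS pos) →
      bLoop os j k cls = cls.find? (fun pos => decide (cntLt OS pos ≤ cntLt CLS pos)) := by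
  induction cls with
  | nil => intro os j k _ _ _ _; rfl
  | cons pos rest ih =>
    intro os j k hos hcls hj hk
    rcases List.pairwise_cons.1 hcls with ⟨hlt, hrest⟩
    have hj0 : j + cntLt os pos = cntLt OS pos := hj pos (by simp)
    have hcnt0 : cntLt (pos :: rest) pos = 0 :=
      cntLt_eq_zero (by intro x hx; rcases List.mem_cons.1 hx with h | h; omega; exact le_of_lt (hlt x h))
    have hk0 : k = cntLt CLS pos := by have := hk pos (by simp); omega
    simp only [bLoop, skipLt_eq, takeWhile_length_eq_cntLt hos]
    by_cases htest : cntLt OS pos ≤ cntLt CLS pos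
    · rw [if_pos (by omega)]
      simp [List.find?, htest]
    · rw [if_neg (by omega)]
      rw [List.find?]
      simp only [htest, decide_false]
      refine ih _ _ _ (hos.sublist (List.dropWhile_sublist _)) hrest ?_ ?_
      · intro pos' hpos'
        have hpp : pos ≤ pos' := le_of_lt (hlt pos' hpos')
        have := hj pos' (by simp [hpos'])
        rw [cntLt_decomp (os := os) hpp, takeWhile_length_eq_cntLt hos] at this
        omega
      · intro pos' hpos'
        have := hk pos' (by simp [hpos'])
        rw [cntLt_cons] at this
        rw [if_pos (hlt pos' hpos')] at this
        omega

-- the balance scan finds the same close (generalized over depth and offset)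
theorem fneg_eq_find (cs : List Char) :
    ∀ (d : Nat) (s : Int),
      (positionsFrom s cs ')').find?
          (fun pos => decide (cntLt (positionsFrom s cs '(') pos + d ≤ cntLt (positionsFrom s cs ')') pos))
        = (fneg d cs).map (fun i => s + (i : Int)) := by
  induction cs with
  | nil => intro d s; simp [positionsFrom, PySem.List.enumerate, fneg]
  | cons c rest ih =>
    intro d s
    have hge : ∀ ch x, x ∈ positionsFrom (s + 1) rest ch → s + 1 ≤ x :=
      fun ch x hx => mem_positionsFrom_ge hx
    by_cases hop : c = '('
    · have hO : positionsFrom s (c :: rest) '(' = s :: positionsFrom (s + 1) rest '(' := by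
        rw [positionsFrom_cons, if_pos hop]; rfl
      have hC : positionsFrom s (c :: rest) ')' = positionsFrom (s + 1) rest ')' := by
        rw [positionsFrom_cons, if_neg (by rw [hop]; decide)]; rfl
      rw [hO, hC]
      rw [find?_congr_mem _ _
            (fun pos => decide (cntLt (positionsFrom (s+1) rest '(') pos + (d+1) ≤ cntLt (positionsFrom (s+1) rest ')') pos)) ?_]
      · rw [ih (d + 1) (s + 1)]
        simp only [fneg, if_pos hop]
        cases fneg (d + 1) rest <;> simp <;> ring
      · intro pos hpos
        have h1 : s < pos := by have := hge _ _ hpos; omega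
        rw [cntLt_cons, if_pos h1]
        simp only [decide_eq_decide]
        omega
    · by_cases hcl : c = ')'
      · have hO : positionsFrom s (c :: rest) '(' = positionsFrom (s + 1) rest '(' := by
          rw [positionsFrom_cons, if_neg (by rw [hcl]; decide)]; rfl
        have hC : positionsFrom s (c :: rest) ')' = s :: positionsFrom (s + 1) rest ')' := by
          rw [positionsFrom_cons, if_pos hcl]; rfl
        rw [hO, hC]
        have hz1 : cntLt (positionsFrom (s+1) rest '(') s = 0 := cntLt_eq_zero (fun x hx => by have := hge _ _ hx; omega)
        have hz2 : cntLt (s :: positionsFrom (s+1) rest ')') s = 0 :=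
          cntLt_eq_zero (by intro x hx; rcases List.mem_cons.1 hx with h | h; omega; have := hge _ _ h; omega)
        match d with
        | 0 =>
          rw [List.find?_cons_of_pos (by simp [hz1, hz2])]
          simp [fneg, hop, hcl]
        | d' + 1 =>
          rw [List.find?_cons_of_neg (by simp [hz1, hz2])]
          rw [find?_congr_mem _ _
                (fun pos => decide (cntLt (positionsFrom (s+1) rest '(') pos + d' ≤ cntLt (positionsFrom (s+1) rest ')') pos)) ?_]
          · rw [ih d' (s + 1)]
            simp only [fneg, if_neg hop, if_pos hcl]
            cases fneg d' rest <;> simp <;> ring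
          · intro pos hpos
            have h1 : s < pos := by have := hge _ _ hpos; omega
            rw [cntLt_cons, if_pos h1]
            simp only [decide_eq_decide]
            omega
      · have hO : positionsFrom s (c :: rest) '(' = positionsFrom (s + 1) rest '(' := by
          rw [positionsFrom_cons, if_neg hop]; rfl
        have hC : positionsFrom s (c :: rest) ')' = positionsFrom (s + 1) rest ')' := by
          rw [positionsFrom_cons, if_neg hcl]; rfl
        rw [hO, hC, ih d (s + 1)]
        simp only [fneg, if_neg hop, if_neg hcl]
        cases fneg d rest <;> simp <;> ring

-- A's loop equals the balance scan (A's cnt==plen break never fires inside the list)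
theorem correctLoop_eq_fneg (cs : List Char) :
    ∀ (d : Nat) (plen cnt : Int), cnt + (cs.length : Int) ≤ plen →
      correctLoop plen cs (d : Int) cnt =
        match fneg d cs with
        | some k => cnt + (k : Int)
        | none => cnt + (cs.length : Int) := by
  induction cs with
  | nil => intro d plen cnt _; simp [correctLoop, fneg]
  | cons c rest ih =>
    intro d plen cnt hle
    simp only [List.length_cons] at hle
    have hne : cnt ≠ plen := by push_cast at hle; omega
    by_cases hop : c = '('
    · have h1 : ¬((d : Int) + 1 = -1) := by omega
      rw [show correctLoop plen (c :: rest) (d : Int) cnt =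
            if (d : Int) + 1 = -1 ∨ cnt = plen then cnt else correctLoop plen rest ((d : Int) + 1) (cnt + 1) by
          simp [correctLoop, hop]]
      rw [if_neg (by tauto)]
      have : ((d : Int) + 1) = ((d + 1 : Nat) : Int) := by push_cast; ring
      rw [this, ih (d + 1) plen (cnt + 1) (by push_cast at hle ⊢; omega)]
      simp only [fneg, if_pos hop]
      cases fneg (d + 1) rest <;> simp <;> push_cast <;> ring
    · by_cases hcl : c = ')'
      · match d with
        | 0 =>
          rw [show correctLoop plen (c :: rest) ((0 : Nat) : Int) cnt =
                if ((0 : Nat) : Int) - 1 = -1 ∨ cnt = plen then cnt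
                else correctLoop plen rest (((0 : Nat) : Int) - 1) (cnt + 1) by
              simp [correctLoop, hop, hcl]]
          rw [if_pos (by left; norm_num)]
          simp [fneg, hop, hcl]
        | d' + 1 =>
          have h1 : ¬(((d' + 1 : Nat) : Int) - 1 = -1) := by push_cast; omega
          rw [show correctLoop plen (c :: rest) ((d' + 1 : Nat) : Int) cnt =
                if ((d' + 1 : Nat) : Int) - 1 = -1 ∨ cnt = plen then cnt
                else correctLoop plen rest (((d' + 1 : Nat) : Int) - 1) (cnt + 1) by
              simp [correctLoop, hop, hcl]]
          rw [if_neg (by tauto)]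
          have : ((d' + 1 : Nat) : Int) - 1 = ((d' : Nat) : Int) := by push_cast; ring
          rw [this, ih d' plen (cnt + 1) (by push_cast at hle ⊢; omega)]
          simp only [fneg, if_neg hop, if_pos hcl]
          cases fneg d' rest <;> simp <;> push_cast <;> ring
      · have h1 : ¬((d : Int) = -1) := by omega
        rw [show correctLoop plen (c :: rest) (d : Int) cnt =
              if (d : Int) = -1 ∨ cnt = plen then cnt else correctLoop plen rest (d : Int) (cnt + 1) by
            simp [correctLoop, hop, hcl]]
        rw [if_neg (by tauto)]
        rw [ih d plen (cnt + 1) (by push_cast at hle ⊢; omega)]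
        simp only [fneg, if_neg hop, if_neg hcl]
        cases fneg d rest <;> simp <;> push_cast <;> ring

-- ===== VERDICT (by name: the statement is the Claim_ definition above) =====
theorem correct_spec : Claim_equal_correct := by
  intro p _
  unfold Spec_correct correct correct_alt
  have hA := correctLoop_eq_fneg p.toList 0 (p.toList.length : Int) 0 (by omega)
  rw [Nat.cast_zero] at hA
  rw [hA]
  rw [show positions p.toList '(' = positionsFrom 0 p.toList '(' from rfl,
      show positions p.toList ')' = positionsFrom 0 p.toList ')' from rfl]
  rw [bLoop_eq (positionsFrom 0 p.toList '(') (positionsFrom 0 p.toList ')') _ _ 0 0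
        ((pairwise_lt_positionsFrom 0 p.toList '(').imp le_of_lt)
        (pairwise_lt_positionsFrom 0 p.toList ')')
        (fun pos _ => by omega)
        (fun pos _ => by omega)]
  rw [find?_congr_mem _ _
        (fun pos => decide (cntLt (positionsFrom 0 p.toList '(') pos + 0 ≤ cntLt (positionsFrom 0 p.toList ')') pos))
        (fun pos _ => by simp)]
  rw [fneg_eq_find p.toList 0 0]
  cases fneg 0 p.toList <;> simp
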